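-- pv_equiv track=rewrite | github.com/ParzivalEugene/School-Informatics | trials/foxford_09.05.2023/15.py | check
-- ===== SOURCE A (Python) =====
-- def check(n):
--     for x in range(1, 100):
--         for y in range(1, 100):
--             if (6 * y - 2 * x > n) or (x + 4 * y < 80) or (2 * y - 3 * x < -72):
--                 continue
--             else:
--                 return False
--     return True
-- ===== SOURCE B (Python) =====
-- def check(n):
--     # Closed form: the loop returns False iff some integer point (x,y) in [1,99]^2
--     # satisfies 6y-2x <= n, x+4y >= 80 and 3x-2y <= 72; the minimum of 6y-2x over
--     # that region is 8 (at x=32, y=12), since (6y-2x) = (x+4y) + (2y-3x) >= 80-72.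
--     return n < 8
-- ===== Notes on version B (the rewrite author's own statement) =====
-- stated objective: simpler
-- what changed: Replaced the 100x100 grid scan with the closed-form feasibility threshold: the minimum of 6y-2x over the fixed constraint region in [1,99]^2 is 8, so check(n) = (n < 8).
import Mathlib
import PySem

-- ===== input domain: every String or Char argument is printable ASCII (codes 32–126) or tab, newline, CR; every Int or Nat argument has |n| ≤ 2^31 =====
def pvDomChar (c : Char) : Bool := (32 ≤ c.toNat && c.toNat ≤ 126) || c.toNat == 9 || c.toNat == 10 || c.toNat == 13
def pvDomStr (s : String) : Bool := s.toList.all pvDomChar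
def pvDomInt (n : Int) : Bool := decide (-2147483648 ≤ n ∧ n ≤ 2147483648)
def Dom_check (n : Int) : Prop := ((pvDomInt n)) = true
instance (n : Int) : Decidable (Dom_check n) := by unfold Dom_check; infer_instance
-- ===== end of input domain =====

-- B replaces A's 100×100 grid scan by the closed-form threshold n < 8.

-- ===== PORT A =====
-- the nested for-loops with an early `return False`: each loop is a short-circuit `all`
-- over its range (the inner `return False` falsifies the outer `all` as well)
def check (n : Int) : Bool :=
  (PySem.List.pyRange 1 100 1).all (fun x =>
    (PySem.List.pyRange 1 100 1).all (fun y =>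
      decide (6 * y - 2 * x > n ∨ x + 4 * y < 80 ∨ 2 * y - 3 * x < -72)))

-- ===== PORT B =====
def check_alt (n : Int) : Bool := decide (n < 8)

-- ===== PRECONDITION & SPEC =====
def Spec_check (n : Int) (out : Bool) : Prop := out = check_alt n
instance (n : Int) (out : Bool) : Decidable (Spec_check n out) := by unfold Spec_check; infer_instance

-- ===== CLAIM (what is proved, stated in full; the proofs are below) =====
def Claim_equal_check : Prop := ∀ (n : Int), Dom_check n → Spec_check n (check n)

-- ===== LEMMAS AND PROOFS =====

theorem check_eq_lt (n : Int) : check n = decide (n < 8) := by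
  by_cases h : n < 8
  · simp only [h, decide_true, check, List.all_eq_true]
    intro x hx y hy
    rw [PySem.List.mem_pyRange_one] at hx hy
    simp only [decide_eq_true_eq]
    omega
  · simp only [h, decide_false, check]
    rw [List.all_eq_false]
    refine ⟨32, by rw [PySem.List.mem_pyRange_one]; omega, ?_⟩
    rw [Bool.not_eq_true, List.all_eq_false]
    refine ⟨12, by rw [PySem.List.mem_pyRange_one]; omega, ?_⟩
    simp only [Bool.not_eq_true, decide_eq_false_iff_not]
    omega

-- ===== VERDICT (by name: the statement is the Claim_ definition above) =====
theorem check_spec : Claim_equal_check := by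
  intro n _
  unfold Spec_check check_alt
  exact check_eq_lt n
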